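-- pv_equiv track=rewrite | github.com/GeorgeJopson/OCR-A-Level-Coding-Challenges | 80-Happy Hopper/Happy Hopper.py | isHappyHopper
-- ===== SOURCE A (Python) =====
-- def isHappyHopper(sequence):
--     jumps=[]
--     for number in range(len(sequence)-1):
--         jumps.append(abs(sequence[number+1]-sequence[number]))
--     requiredJumps=[]
--     for number in range(1,len(sequence)):
--         requiredJumps.append(number)
--     jumps.sort()
--     requiredJumps.sort()
--     if(jumps==requiredJumps):
--         return True
--     else:
--         return False
-- ===== SOURCE B (Python) =====
-- def isHappyHopper(sequence):
--     n = len(sequence)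
--     seen = [False] * (n - 1 if n > 0 else 0)
--     for a, b in zip(sequence, sequence[1:]):
--         d = abs(b - a)
--         if d < 1 or d > n - 1 or seen[d - 1]:
--             return False
--         seen[d - 1] = True
--     return True
-- ===== Notes on version B (the rewrite author's own statement) =====
-- stated objective: faster
-- what changed: Instead of building and sorting both the jump list and the required list and comparing them, B marks each absolute jump in a boolean array of size n-1 and rejects out-of-range or duplicate jumps on the fly, with early exit.
import Mathlib
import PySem

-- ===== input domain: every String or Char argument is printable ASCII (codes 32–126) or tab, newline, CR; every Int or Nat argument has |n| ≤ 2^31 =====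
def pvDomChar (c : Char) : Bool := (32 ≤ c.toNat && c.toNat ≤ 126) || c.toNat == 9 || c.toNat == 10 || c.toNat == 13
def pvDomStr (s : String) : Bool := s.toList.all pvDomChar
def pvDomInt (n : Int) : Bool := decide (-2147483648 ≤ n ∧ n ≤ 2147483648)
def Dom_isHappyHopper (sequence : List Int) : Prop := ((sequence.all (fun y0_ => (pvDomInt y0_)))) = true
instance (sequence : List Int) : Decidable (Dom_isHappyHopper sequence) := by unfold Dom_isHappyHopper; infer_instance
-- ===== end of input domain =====

-- B replaces "collect all jumps, sort both lists, compare" by a single pass that marks each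
-- jump in a boolean array of size n-1, rejecting out-of-range or duplicate jumps early.

-- ===== PORT A =====
def isHappyHopper (sequence : List Int) : Bool :=
  let jumps := (PySem.List.pyRange 0 (PySem.List.len sequence - 1) 1).foldl
    (fun acc number =>
      acc ++ [|PySem.List.pyGetD sequence (number + 1) 0 - PySem.List.pyGetD sequence number 0|]) []
  let requiredJumps := (PySem.List.pyRange 1 (PySem.List.len sequence) 1).foldl
    (fun acc number => acc ++ [number]) []
  let jumpsS := PySem.List.sorted jumps (fun x => x) false
  let requiredS := PySem.List.sorted requiredJumps (fun x => x) false
  if jumpsS = requiredS then true else false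

-- ===== PORT B =====
-- the for-loop of Source B; the early 'return False' becomes stopping the recursion with false
def hopLoop (n : Int) : List (Int × Int) → List Bool → Bool
  | [], _ => true
  | (a, b) :: rest, seen =>
    if |b - a| < 1 ∨ |b - a| > n - 1 ∨ PySem.List.pyGetD seen (|b - a| - 1) false = true then false
    else hopLoop n rest (PySem.List.pySetD seen (|b - a| - 1) true)

def isHappyHopper_alt (sequence : List Int) : Bool :=
  let n := PySem.List.len sequence
  hopLoop n (sequence.zip (PySem.List.slice sequence (some 1) none))
    (List.replicate (if n > 0 then n - 1 else 0).toNat false)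

-- ===== PRECONDITION & SPEC =====
def Spec_isHappyHopper (sequence : List Int) (out : Bool) : Prop := out = isHappyHopper_alt sequence
instance (sequence : List Int) (out : Bool) : Decidable (Spec_isHappyHopper sequence out) := by unfold Spec_isHappyHopper; infer_instance

-- ===== CLAIM (what is proved, stated in full; the proofs are below) =====
def Claim_equal_isHappyHopper : Prop := ∀ (sequence : List Int), Dom_isHappyHopper sequence → Spec_isHappyHopper sequence (isHappyHopper sequence)

-- ===== LEMMAS AND PROOFS =====

-- the list of absolute consecutive differences
def pvDs (seq : List Int) : List Int := (seq.zip (seq.drop 1)).map (fun p => |p.2 - p.1|)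

theorem pvDs_length (seq : List Int) : (pvDs seq).length = ((seq.length : Int) - 1).toNat := by
  simp [pvDs]

theorem foldl_push {α β : Type} (l : List α) (f : α → β) :
    ∀ init : List β, l.foldl (fun acc x => acc ++ [f x]) init = init ++ l.map f := by
  induction l with
  | nil => simp
  | cons x xs ih => intro init; simp [List.foldl_cons, ih]

theorem jumps_eq (seq : List Int) :
    (PySem.List.pyRange 0 ((seq.length : Int) - 1) 1).map
      (fun number => |PySem.List.pyGetD seq (number + 1) 0 - PySem.List.pyGetD seq number 0|)
      = pvDs seq := by
  apply List.ext_getElem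
  · simp [PySem.List.length_pyRange_one, pvDs]
  · intro k h1 h2
    have hk : k < ((seq.length : Int) - 1).toNat := by
      simpa [PySem.List.length_pyRange_one] using h1
    simp only [List.getElem_map, PySem.List.getElem_pyRange_one, pvDs, List.getElem_zip, List.getElem_drop]
    rw [PySem.List.pyGetD_eq_getElem seq 0 (by omega) (by omega),
        PySem.List.pyGetD_eq_getElem seq 0 (by omega) (by omega)]
    simp [abs_sub_comm, Nat.add_comm]

theorem A_iff (seq : List Int) :
    isHappyHopper seq = true ↔ (pvDs seq).Perm (PySem.List.pyRange 1 (seq.length : Int) 1) := by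
  unfold isHappyHopper
  simp only [PySem.List.len_eq, foldl_push, List.nil_append, jumps_eq, List.map_id']
  split_ifs with h
  · simp only [true_iff]
    exact (PySem.List.sorted_id_eq_sorted_id_iff_perm _ _).mp h
  · simp only [false_iff]
    intro hp
    exact h ((PySem.List.sorted_id_eq_sorted_id_iff_perm _ _).mpr hp)

theorem hopLoop_iff (n : Int) (ps : List (Int × Int)) :
    ∀ seen : List Bool, seen.length = (n - 1).toNat →
    (hopLoop n ps seen = true ↔
      ((ps.map (fun p => |p.2 - p.1|)).Nodup ∧
       ∀ d ∈ ps.map (fun p => |p.2 - p.1|),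
         1 ≤ d ∧ d ≤ n - 1 ∧ PySem.List.pyGetD seen (d - 1) false = false)) := by
  induction ps with
  | nil => intro seen _; simp [hopLoop]
  | cons p rest ih =>
    obtain ⟨a, b⟩ := p
    intro seen hlen
    by_cases hbad : |b - a| < 1 ∨ |b - a| > n - 1 ∨ PySem.List.pyGetD seen (|b - a| - 1) false = true
    · rw [hopLoop, if_pos hbad]
      simp only [Bool.false_eq_true, false_iff]
      rintro ⟨hnd, hall⟩
      have hd := hall |b - a| (by simp)
      rcases hbad with h | h | h
      · omega
      · omega
      · rw [hd.2.2] at h; exact Bool.noConfusion h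
    · push_neg at hbad
      obtain ⟨hb1, hb2, hb3⟩ := hbad
      have hb1 : (1:Int) ≤ |b - a| := by omega
      have hb3' : PySem.List.pyGetD seen (|b - a| - 1) false = false := by
        cases h : PySem.List.pyGetD seen (|b - a| - 1) false
        · rfl
        · exact absurd h hb3
      rw [hopLoop, if_neg (by rw [hb3'] ; push_neg ; exact ⟨by omega, by omega, Bool.noConfusion⟩)]
      have hidx : (|b - a| - 1).toNat < seen.length := by rw [hlen]; omega
      have key : ∀ e : Int, 1 ≤ e →
          PySem.List.pyGetD (PySem.List.pySetD seen (|b - a| - 1) true) (e - 1) false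
            = if e = |b - a| then true else PySem.List.pyGetD seen (e - 1) false := by
        intro e he
        rw [show |b - a| - 1 = (((|b - a| - 1).toNat : Nat) : Int) by omega,
            show e - 1 = (((e - 1).toNat : Nat) : Int) by omega]
        rw [PySem.List.pyGetD_pySetD_natCast seen _ _ true false hidx]
        have heq : ((e - 1).toNat = (|b - a| - 1).toNat) ↔ e = |b - a| := by omega
        by_cases hed : e = |b - a|
        · rw [if_pos (heq.mpr hed), if_pos hed]
        · rw [if_neg (fun hc => hed (heq.mp hc)), if_neg hed]
      rw [ih _ (by rw [PySem.List.length_pySetD]; exact hlen)]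
      constructor
      · rintro ⟨hnd, hall⟩
        have hdnot : |b - a| ∉ rest.map (fun p => |p.2 - p.1|) := by
          intro hmem
          have h3 := (hall _ hmem).2.2
          rw [key _ (hall _ hmem).1, if_pos rfl] at h3
          exact Bool.noConfusion h3
        refine ⟨List.nodup_cons.mpr ⟨hdnot, hnd⟩, ?_⟩
        intro e he
        rcases List.mem_cons.mp he with he | he
        · exact he ▸ ⟨hb1, hb2, hb3'⟩
        · obtain ⟨h1, h2, h3⟩ := hall e he
          refine ⟨h1, h2, ?_⟩
          rw [key e h1] at h3
          by_cases hed : e = |b - a|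
          · rw [if_pos hed] at h3; exact absurd h3 (by simp)
          · rwa [if_neg hed] at h3
      · rintro ⟨hnd, hall⟩
        obtain ⟨hdnot, hnd'⟩ := List.nodup_cons.mp hnd
        refine ⟨hnd', ?_⟩
        intro e he
        obtain ⟨h1, h2, h3⟩ := hall e (List.mem_cons_of_mem _ he)
        refine ⟨h1, h2, ?_⟩
        rw [key e h1, if_neg (fun hc : e = |b - a| => hdnot (by rwa [hc] at he))]
        exact h3

theorem pyGetD_replicate_false (k : Nat) (i : Int) :
    PySem.List.pyGetD (List.replicate k false) i false = false := by
  simp only [PySem.List.pyGetD]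
  cases h : PySem.List.pyGet? (List.replicate k false) i
  · simp
  · have := PySem.List.mem_of_pyGet?_eq_some _ h
    simp [List.eq_of_mem_replicate this]

theorem B_iff (seq : List Int) :
    isHappyHopper_alt seq = true ↔
      ((pvDs seq).Nodup ∧ ∀ d ∈ pvDs seq, 1 ≤ d ∧ d ≤ (seq.length : Int) - 1) := by
  unfold isHappyHopper_alt
  simp only [PySem.List.len_eq]
  rw [show (1 : Int) = ((1 : Nat) : Int) from rfl, PySem.List.slice_from_natCast]
  rw [hopLoop_iff _ _ _ (by rw [List.length_replicate]; split <;> omega)]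
  unfold pvDs
  constructor
  · rintro ⟨hnd, hall⟩
    exact ⟨hnd, fun d hd => ⟨(hall d hd).1, (hall d hd).2.1⟩⟩
  · rintro ⟨hnd, hall⟩
    exact ⟨hnd, fun d hd => ⟨(hall d hd).1, (hall d hd).2, pyGetD_replicate_false _ _⟩⟩

theorem perm_iff (seq : List Int) :
    (pvDs seq).Perm (PySem.List.pyRange 1 (seq.length : Int) 1) ↔
      ((pvDs seq).Nodup ∧ ∀ d ∈ pvDs seq, 1 ≤ d ∧ d ≤ (seq.length : Int) - 1) := by
  constructor
  · intro hp
    refine ⟨hp.nodup_iff.mpr (PySem.List.nodup_pyRange_one _ _), ?_⟩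
    intro d hd
    have := PySem.List.mem_pyRange_one.mp (hp.mem_iff.mp hd)
    omega
  · rintro ⟨hnd, hall⟩
    have hsub : pvDs seq ⊆ PySem.List.pyRange 1 (seq.length : Int) 1 := by
      intro d hd
      exact PySem.List.mem_pyRange_one.mpr ⟨(hall d hd).1, by have := (hall d hd).2; omega⟩
    refine (hnd.subperm hsub).perm_of_length_le ?_
    rw [PySem.List.length_pyRange_one, pvDs_length]

-- ===== VERDICT (by name: the statement is the Claim_ definition above) =====
theorem isHappyHopper_spec : Claim_equal_isHappyHopper := by
  intro seq _
  unfold Spec_isHappyHopper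
  rw [Bool.eq_iff_iff, A_iff, B_iff, perm_iff]
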